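-- pv_equiv track=rewrite | github.com/ansh2909-jain/codes | 100Q.py | alternative_sort
-- ===== SOURCE A (Python) =====
-- def alternative_sort(arr):
--     arr.sort()
--     left = 0
--     right = len(arr) - 1
--     result = []
--
--     while left <= right:
--         if left <= right:
--             result.append(arr[right])
--             right -= 1
--         if left <= right:
--             result.append(arr[left])
--             left += 1
--     return result
-- ===== SOURCE B (Python) =====
-- def alternative_sort(arr):
--     arr.sort()
--     n = len(arr)
--     lows = arr[:n // 2]
--     highs = arr[n // 2:][::-1]
--     result = []
--     for h, l in zip(highs, lows):
--         result.append(h)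
--         result.append(l)
--     if len(highs) > len(lows):
--         result.append(highs[-1])
--     return result
-- ===== Notes on version B (the rewrite author's own statement) =====
-- stated objective: simpler
-- what changed: Replaces A's two-pointer while loop with interleaving branches by splitting the sorted list into a low half and a reversed high half and zipping them, appending the leftover high element for odd lengths.
import Mathlib
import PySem

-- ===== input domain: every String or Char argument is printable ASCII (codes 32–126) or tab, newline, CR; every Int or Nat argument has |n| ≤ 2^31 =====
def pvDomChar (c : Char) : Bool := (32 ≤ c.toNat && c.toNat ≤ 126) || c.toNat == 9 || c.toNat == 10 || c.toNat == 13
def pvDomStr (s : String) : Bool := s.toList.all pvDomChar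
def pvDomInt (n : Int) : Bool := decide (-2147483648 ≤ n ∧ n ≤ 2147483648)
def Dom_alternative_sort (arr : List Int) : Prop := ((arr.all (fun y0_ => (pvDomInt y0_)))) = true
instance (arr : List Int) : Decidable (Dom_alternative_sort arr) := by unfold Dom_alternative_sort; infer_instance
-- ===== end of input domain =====

-- B replaces A's two-pointer while loop by split-in-half + zip interleaving (objective: simpler
-- decomposition, same cost); both A and B sort the caller's list in place — the proof is about the
-- return value.

-- ===== PORT A =====
-- A's while loop: per iteration append arr[right] (right -= 1), then if still left ≤ right
-- append arr[left] (left += 1).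
def pvLoopA (s : List Int) (l r : Int) : List Int :=
  if h : l ≤ r then
    if h2 : l ≤ r - 1 then
      PySem.List.pyGetD s r 0 :: PySem.List.pyGetD s l 0 :: pvLoopA s (l + 1) (r - 1)
    else [PySem.List.pyGetD s r 0]
  else []
termination_by (r + 1 - l).toNat
decreasing_by omega

def alternative_sort (arr : List Int) : List Int :=
  let s := PySem.List.sorted arr (fun x => x) false
  pvLoopA s 0 ((s.length : Int) - 1)

-- ===== PORT B =====
def alternative_sort_alt (arr : List Int) : List Int :=
  let s := PySem.List.sorted arr (fun x => x) false
  let n := s.length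
  let lows := PySem.List.slice s none (some ((n / 2 : Nat) : Int))
  let highs := (PySem.List.slice s (some ((n / 2 : Nat) : Int)) none).reverse
  let res := (highs.zip lows).foldl (fun acc p => acc ++ [p.1, p.2]) []
  if lows.length < highs.length then res ++ [PySem.List.pyGetD highs (-1) 0] else res

-- ===== PRECONDITION & SPEC =====
def Spec_alternative_sort (arr : List Int) (out : List Int) : Prop := out = alternative_sort_alt arr
instance (arr : List Int) (out : List Int) : Decidable (Spec_alternative_sort arr out) := by unfold Spec_alternative_sort; infer_instance

-- ===== CLAIM (what is proved, stated in full; the proofs are below) =====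
def Claim_equal_alternative_sort : Prop := ∀ (arr : List Int), Dom_alternative_sort arr → Spec_alternative_sort arr (alternative_sort arr)

-- ===== LEMMAS AND PROOFS =====

-- common specification: peel the last and first element, recurse on the middle
def pvZig : List Int → List Int
  | [] => []
  | [x] => [x]
  | x :: y :: t => (y :: t).getLastD 0 :: x :: pvZig ((y :: t).dropLast)
termination_by l => l.length
decreasing_by simp

theorem pvZig_twoends (x z : Int) (m : List Int) :
    pvZig (x :: (m ++ [z])) = z :: x :: pvZig m := by
  cases m with
  | nil =>
    rw [show (x :: ([] ++ [z]) : List Int) = x :: z :: [] by simp, pvZig]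
    simp [pvZig]
  | cons a t =>
    rw [show (x :: (a :: t ++ [z]) : List Int) = x :: a :: (t ++ [z]) by simp, pvZig]
    rw [show (a :: (t ++ [z]) : List Int) = (a :: t) ++ [z] by simp]
    rw [List.getLastD_concat, List.dropLast_concat]

-- B restated with take/drop/flatMap in place of slice/foldl
def pvZigB (s : List Int) : List Int :=
  let lows := s.take (s.length / 2)
  let highs := (s.drop (s.length / 2)).reverse
  let res := (highs.zip lows).flatMap (fun p => [p.1, p.2])
  if lows.length < highs.length then res ++ [PySem.List.pyGetD highs (-1) 0] else res

theorem pvFoldl_pairs (ps : List (Int × Int)) (acc : List Int) :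
    ps.foldl (fun a p => a ++ [p.1, p.2]) acc = acc ++ ps.flatMap (fun p => [p.1, p.2]) := by
  induction ps generalizing acc with
  | nil => simp
  | cons p t ih => simp [ih, List.append_assoc]

theorem pvAlt_eq_zigB (arr : List Int) :
    alternative_sort_alt arr = pvZigB (PySem.List.sorted arr (fun x => x) false) := by
  unfold alternative_sort_alt pvZigB
  simp only [PySem.List.slice_to_natCast, PySem.List.slice_from_natCast, pvFoldl_pairs,
    List.nil_append]

theorem pvLoopA_eq_zig (k : Nat) (s : List Int) (l r : Int)
    (hl : 0 ≤ l) (hr : r < s.length) (hk : k = (r + 1 - l).toNat) :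
    pvLoopA s l r = pvZig ((s.drop l.toNat).take k) := by
  induction k using Nat.strong_induction_on generalizing l r with
  | _ k ih =>
    rw [pvLoopA]
    by_cases h : l ≤ r
    · have hln : l.toNat < s.length := by omega
      have hrn : r.toNat < s.length := by omega
      have hdl : s.drop l.toNat = s[l.toNat] :: s.drop (l.toNat + 1) :=
        List.drop_eq_getElem_cons hln
      by_cases h2 : l ≤ r - 1
      · rw [dif_pos h, dif_pos h2]
        have hk2 : k = (r - l - 1).toNat + 2 := by omega
        have hmid : (s.drop (l.toNat + 1)).take ((r - l - 1).toNat + 1)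
            = (s.drop (l.toNat + 1)).take ((r - l - 1).toNat) ++ [s[r.toNat]] := by
          rw [List.take_add_one]
          have : (s.drop (l.toNat + 1))[(r - l - 1).toNat]? = some s[r.toNat] := by
            rw [List.getElem?_drop]
            have : l.toNat + 1 + (r - l - 1).toNat = r.toNat := by omega
            rw [this, List.getElem?_eq_getElem hrn]
          rw [this]
          rfl
        rw [hk2, hdl, List.take_succ_cons, hmid, pvZig_twoends]
        have h1 : (l + 1).toNat = l.toNat + 1 := by omega
        rw [PySem.List.pyGetD_eq_getElem s 0 (by omega) hr,
            PySem.List.pyGetD_eq_getElem s 0 hl (by omega),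
            ih ((r - l - 1).toNat) (by omega) (l + 1) (r - 1) (by omega) (by omega) (by omega), h1]
      · rw [dif_pos h, dif_neg h2]
        have hk1 : k = 1 := by omega
        have hlr : l.toNat = r.toNat := by omega
        have hdl' : List.drop l.toNat s = s[r.toNat] :: List.drop (l.toNat + 1) s := by
          rw [hlr]
          exact List.drop_eq_getElem_cons hrn
        rw [hk1, hdl', List.take_succ_cons, List.take_zero,
            PySem.List.pyGetD_eq_getElem s 0 (by omega) hr]
        simp [pvZig]
    · rw [dif_neg h]
      have : k = 0 := by omega
      simp [this, pvZig]

theorem pvZigB_twoends (x z : Int) (m : List Int) :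
    pvZigB (x :: (m ++ [z])) = z :: x :: pvZigB m := by
  have hle : m.length / 2 ≤ m.length := Nat.div_le_self _ _
  unfold pvZigB
  simp only [List.length_cons, List.length_append, List.length_nil]
  have hk2 : (m.length + 1 + 1) / 2 = m.length / 2 + 1 := by omega
  simp only [hk2, List.take_succ_cons, List.drop_succ_cons,
      List.take_append_of_le_length hle, List.drop_append_of_le_length hle,
      List.reverse_append, List.reverse_cons, List.reverse_nil, List.nil_append,
      List.singleton_append, List.zip_cons_cons, List.flatMap_cons]
  by_cases hc : (m.take (m.length / 2)).length < ((m.drop (m.length / 2)).reverse).length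
  · have hne : (m.drop (m.length / 2)).reverse ≠ [] := by
      intro hemp
      rw [hemp] at hc
      simp at hc
    rw [if_pos (by simp only [List.length_cons]; omega), if_pos hc]
    rw [PySem.List.pyGetD_neg_one _ _ (by simp),
        PySem.List.pyGetD_neg_one _ _ hne, List.getLast_cons hne]
    simp
  · rw [if_neg (by simp only [List.length_cons]; omega), if_neg hc]
    simp

theorem pvZigB_eq_zig (s : List Int) : pvZigB s = pvZig s := by
  induction hn : s.length using Nat.strong_induction_on generalizing s with
  | _ n ih =>
    match s with
    | [] => simp [pvZigB, pvZig]
    | [x] => simp [pvZigB, pvZig, PySem.List.pyGetD_neg_one]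
    | x :: y :: t =>
      have hm : x :: y :: t = x :: ((y :: t).dropLast ++ [(y :: t).getLast (by simp)]) := by
        rw [List.dropLast_append_getLast]
      rw [hm, pvZigB_twoends, pvZig_twoends,
          ih ((y :: t).dropLast.length) (by simp at hn ⊢; omega) _ rfl]

-- ===== VERDICT (by name: the statement is the Claim_ definition above) =====
theorem alternative_sort_spec : Claim_equal_alternative_sort := by
  intro arr _
  unfold Spec_alternative_sort
  rw [pvAlt_eq_zigB, pvZigB_eq_zig]
  unfold alternative_sort
  set s := PySem.List.sorted arr (fun x => x) false with hs
  rw [pvLoopA_eq_zig s.length s 0 ((s.length : Int) - 1) (by omega) (by omega) (by omega)]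
  simp
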